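-- pv_equiv track=rewrite | github.com/MissyMedina/AutoDevCore | fix_formatting.py | fix_import_spacing
-- ===== SOURCE A (Python) =====
-- def fix_import_spacing(content):
--     """Fix spacing around imports."""
--     lines = content.split("\n")
--     fixed_lines = []
--     changes = 0
--     prev_was_import = False
--
--     for i, line in enumerate(lines):
--         stripped = line.strip()
--
--         # Check if this is an import line
--         is_import = (
--             stripped.startswith("import ")
--             or stripped.startswith("from ")
--             or stripped.startswith("#")
--             and "import" in stripped
--         )
--
--         # Add blank line before first import if needed
--         if (
--             is_import
--             and not prev_was_import
--             and i > 0
--             and lines[i - 1].strip()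
--             and not lines[i - 1].strip().startswith("#")
--         ):
--             if fixed_lines and fixed_lines[-1].strip():
--                 fixed_lines.append("")
--                 changes += 1
--
--         fixed_lines.append(line)
--         prev_was_import = is_import
--
--     return "\n".join(fixed_lines), changes
-- ===== SOURCE B (Python) =====
-- def fix_import_spacing(content):
--     """Fix spacing around imports (index-driven two-pass rewrite)."""
--     lines = content.split("\n")
--
--     def _is_import(line):
--         s = line.strip()
--         return (
--             s.startswith("import ")
--             or s.startswith("from ")
--             or s.startswith("#")
--             and "import" in s
--         )
--
--     flags = [_is_import(line) for line in lines]
--     inserts = [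
--         i
--         for i in range(1, len(lines))
--         if flags[i]
--         and not flags[i - 1]
--         and lines[i - 1].strip()
--         and not lines[i - 1].strip().startswith("#")
--     ]
--
--     out = []
--     for i, line in enumerate(lines):
--         if i in inserts:
--             out.append("")
--         out.append(line)
--     return "\n".join(out), len(inserts)
-- ===== Notes on version B (the rewrite author's own statement) =====
-- stated objective: alternative
-- what changed: B replaces A's single interleaved pass with a running prev_was_import flag and a changes counter by an index-driven two-pass rewrite: first compute the per-line import flags and the list of insertion indices, then emit the lines inserting a blank before each marked index; changes is just the length of the index list.
import Mathlib
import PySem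

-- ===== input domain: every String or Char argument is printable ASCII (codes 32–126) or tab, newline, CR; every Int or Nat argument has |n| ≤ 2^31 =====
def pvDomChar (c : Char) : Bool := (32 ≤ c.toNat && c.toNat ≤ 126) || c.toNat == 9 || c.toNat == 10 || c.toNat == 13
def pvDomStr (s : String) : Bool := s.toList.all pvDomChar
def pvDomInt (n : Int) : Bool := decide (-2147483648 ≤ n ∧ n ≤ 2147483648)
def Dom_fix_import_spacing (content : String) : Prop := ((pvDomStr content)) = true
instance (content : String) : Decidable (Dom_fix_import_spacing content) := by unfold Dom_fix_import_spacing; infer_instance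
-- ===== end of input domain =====

-- B replaces A's single interleaved pass with a running flag by an index-driven two-pass
-- rewrite (compute the insertion indices first, then emit); objective: alternative decomposition.

-- ===== PORT A =====
-- A's loop body: state is (fixed_lines, changes, prev_was_import), element is (i, line).
def pvStepA (lines : List String) (st : List String × Int × Bool) (il : Int × String) :
    List String × Int × Bool :=
  let fixed_lines := st.1
  let changes := st.2.1
  let prev_was_import := st.2.2
  let i := il.1
  let line := il.2
  let stripped := PySem.Str.strip line
  let is_import :=
    PySem.Str.startswith stripped "import " ||
    PySem.Str.startswith stripped "from " ||
    (PySem.Str.startswith stripped "#" && PySem.Str.isIn "import" stripped)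
  let st1 :=
    if is_import && !prev_was_import && decide (0 < i) &&
        !(PySem.Str.strip (PySem.List.pyGetD lines (i - 1) "")).toList.isEmpty &&
        !PySem.Str.startswith (PySem.Str.strip (PySem.List.pyGetD lines (i - 1) "")) "#" then
      if decide (fixed_lines ≠ []) &&
          !(PySem.Str.strip (PySem.List.pyGetD fixed_lines (-1) "")).toList.isEmpty then
        (fixed_lines ++ [""], changes + 1)
      else (fixed_lines, changes)
    else (fixed_lines, changes)
  (st1.1 ++ [line], st1.2, is_import)

def fix_import_spacing (content : String) : String × Int :=
  let lines := (PySem.Str.split? content "\n").getD []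
  let res := (PySem.List.enumerate lines 0).foldl (pvStepA lines) ([], 0, false)
  (PySem.Str.join "\n" res.1, res.2.1)

-- ===== PORT B =====
def pvIsImport (line : String) : Bool :=
  let s := PySem.Str.strip line
  PySem.Str.startswith s "import " ||
  PySem.Str.startswith s "from " ||
  (PySem.Str.startswith s "#" && PySem.Str.isIn "import" s)

def pvInsertCond (lines : List String) (flags : List Bool) (i : Int) : Bool :=
  PySem.List.pyGetD flags i false &&
  !PySem.List.pyGetD flags (i - 1) false &&
  !(PySem.Str.strip (PySem.List.pyGetD lines (i - 1) "")).toList.isEmpty &&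
  !PySem.Str.startswith (PySem.Str.strip (PySem.List.pyGetD lines (i - 1) "")) "#"

def fix_import_spacing_alt (content : String) : String × Int :=
  let lines := (PySem.Str.split? content "\n").getD []
  let flags := lines.map pvIsImport
  let inserts :=
    (PySem.List.pyRange 1 (lines.length : Int) 1).filter (pvInsertCond lines flags)
  let out := (PySem.List.enumerate lines 0).foldl
    (fun acc il => (if inserts.contains il.1 then acc ++ [""] else acc) ++ [il.2]) []
  (PySem.Str.join "\n" out, (inserts.length : Int))

-- ===== PRECONDITION & SPEC =====
def Spec_fix_import_spacing (content : String) (out : String × Int) : Prop := out = fix_import_spacing_alt content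
instance (content : String) (out : String × Int) : Decidable (Spec_fix_import_spacing content out) := by unfold Spec_fix_import_spacing; infer_instance

-- ===== CLAIM (what is proved, stated in full; the proofs are below) =====
def Claim_equal_fix_import_spacing : Prop := ∀ (content : String), Dom_fix_import_spacing content → Spec_fix_import_spacing content (fix_import_spacing content)

-- ===== LEMMAS AND PROOFS =====

-- the insertion list of B, as a function of the split lines
def pvInserts (lines : List String) : List Int :=
  (PySem.List.pyRange 1 (lines.length : Int) 1).filter
    (pvInsertCond lines (lines.map pvIsImport))

-- A's outer insertion condition at natural index i, fully in terms of the lines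
def pvAcond (lines : List String) (i : Nat) : Bool :=
  pvIsImport (lines.getD i "") && !pvIsImport (lines.getD (i - 1) "") && decide (0 < i) &&
  !(PySem.Str.strip (lines.getD (i - 1) "")).toList.isEmpty &&
  !PySem.Str.startswith (PySem.Str.strip (lines.getD (i - 1) "")) "#"

lemma pvCond_cast (lines : List String) (i : Nat) (h1 : 1 ≤ i) (h2 : i < lines.length) :
    pvInsertCond lines (lines.map pvIsImport) (i : Int) = pvAcond lines i := by
  have hi1 : ((i : Int) - 1) = (((i - 1 : Nat)) : Int) := by omega
  have h3 : i - 1 < lines.length := by omega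
  unfold pvInsertCond pvAcond
  rw [hi1]
  simp only [PySem.List.pyGetD_natCast, List.getD_eq_getElem?_getD, List.getElem?_map,
    List.getElem?_eq_getElem h2, List.getElem?_eq_getElem h3, Option.map_some, Option.getD_some]
  have : decide (0 < i) = true := by simp; omega
  rw [this]
  simp [Bool.and_comm, Bool.and_assoc]

lemma pvContains_char (lines : List String) (i : Nat) :
    (pvInserts lines).contains (i : Int) =
      (decide (i < lines.length) && pvAcond lines i) := by
  rw [Bool.eq_iff_iff, List.contains_iff_mem]
  unfold pvInserts
  rw [List.mem_filter]
  simp only [PySem.List.mem_pyRange_one, Bool.and_eq_true, decide_eq_true_eq]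
  constructor
  · rintro ⟨⟨hge, hlt⟩, hc⟩
    have h1 : 1 ≤ i := by exact_mod_cast hge
    have h2 : i < lines.length := by exact_mod_cast hlt
    exact ⟨h2, by rw [← pvCond_cast lines i h1 h2]; exact hc⟩
  · rintro ⟨h2, hc⟩
    have h1 : 1 ≤ i := by
      by_contra h
      have : i = 0 := by omega
      subst this
      simp [pvAcond] at hc
    exact ⟨⟨by exact_mod_cast h1, by exact_mod_cast h2⟩,
      by rw [pvCond_cast lines i h1 h2]; exact hc⟩

lemma pvLoopA (lines : List String) :
    ∀ (r : List String) (i : Nat) (acc : List String) (ch : Int) (prev : Bool),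
      lines.drop i = r →
      prev = (decide (0 < i) && pvIsImport (lines.getD (i - 1) "")) →
      (i = 0 → acc = []) →
      (0 < i → ∃ a, acc = a ++ [lines.getD (i - 1) ""]) →
      ∃ p, (PySem.List.enumerate r (i : Int)).foldl (pvStepA lines) (acc, ch, prev) =
        (acc ++ (PySem.List.enumerate r (i : Int)).flatMap
            (fun il => (if (pvInserts lines).contains il.1 then [""] else []) ++ [il.2]),
         ch + ((PySem.List.enumerate r (i : Int)).countP
            (fun il => (pvInserts lines).contains il.1) : Int),
         p) := by
  intro r
  induction r with
  | nil =>
    intro i acc ch prev _ _ _ _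
    exact ⟨prev, by simp [PySem.List.enumerate]⟩
  | cons line r' ih =>
    intro i acc ch prev hdrop hprev hacc0 haccpos
    have hlen : i < lines.length := by
      have := congrArg List.length hdrop
      simp at this
      omega
    rw [List.drop_eq_getElem_cons hlen] at hdrop
    injection hdrop with h1 h2
    have hgetD : lines.getD i "" = line := by
      rw [List.getD_eq_getElem?_getD, List.getElem?_eq_getElem hlen, Option.getD_some, h1]
    -- the outer condition of A's step equals membership of i in B's insertion list
    have hC : (pvIsImport line && !prev && decide (0 < (i : Int)) &&
          !(PySem.Str.strip (PySem.List.pyGetD lines ((i : Int) - 1) "")).toList.isEmpty &&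
          !PySem.Str.startswith (PySem.Str.strip (PySem.List.pyGetD lines ((i : Int) - 1) "")) "#")
        = (pvInserts lines).contains (i : Int) := by
      rw [pvContains_char, decide_eq_true hlen, Bool.true_and]
      rcases Nat.eq_zero_or_pos i with h0 | hpos
      · subst h0
        simp [pvAcond]
      · have hcast : ((i : Int) - 1) = (((i - 1 : Nat)) : Int) := by omega
        rw [hcast, hprev]
        unfold pvAcond
        have hd : decide (0 < i) = true := by simp [hpos]
        simp only [PySem.List.pyGetD_natCast, hd, Bool.true_and, hgetD,
          decide_eq_true (show (0:Int) < (i:Int) by exact_mod_cast hpos)]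
    have hstep : pvStepA lines (acc, ch, prev) ((i : Int), line) =
        ((if (pvInserts lines).contains (i : Int) then acc ++ [""] else acc) ++ [line],
         ch + (if (pvInserts lines).contains (i : Int) then 1 else 0), pvIsImport line) := by
      unfold pvStepA
      dsimp only
      rw [show (PySem.Str.startswith (PySem.Str.strip line) "import " ||
            PySem.Str.startswith (PySem.Str.strip line) "from " ||
            (PySem.Str.startswith (PySem.Str.strip line) "#" &&
              PySem.Str.isIn "import" (PySem.Str.strip line))) = pvIsImport line from rfl]
      rw [hC]
      by_cases hb : (pvInserts lines).contains (i : Int) = true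
      · rw [hb]
        -- extract from the outer condition that i > 0 and the previous line strips nonempty
        have hCtrue := hC.trans hb
        simp only [Bool.and_eq_true, decide_eq_true_eq, Bool.not_eq_eq_eq_not, Bool.not_true] at hCtrue
        obtain ⟨⟨⟨⟨_, _⟩, hposI⟩, htruthy⟩, _⟩ := hCtrue
        have hpos : 0 < i := by exact_mod_cast hposI
        obtain ⟨a, ha⟩ := haccpos hpos
        have hcast : ((i : Int) - 1) = (((i - 1 : Nat)) : Int) := by omega
        rw [hcast, PySem.List.pyGetD_natCast] at htruthy
        have hinner : (decide (acc ≠ []) &&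
            !(PySem.Str.strip (PySem.List.pyGetD acc (-1) "")).toList.isEmpty) = true := by
          rw [ha, PySem.List.pyGetD_neg_one_append_singleton, htruthy]
          simp
        rw [hinner]
        simp
      · rw [Bool.not_eq_true] at hb
        rw [hb]
        simp
    rw [PySem.List.enumerate_cons, List.foldl_cons, hstep]
    have hcast1 : (i : Int) + 1 = ((i + 1 : Nat) : Int) := by omega
    rw [hcast1]
    obtain ⟨p, hp⟩ := ih (i + 1)
      ((if (pvInserts lines).contains (i : Int) then acc ++ [""] else acc) ++ [line])
      (ch + (if (pvInserts lines).contains (i : Int) then 1 else 0))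
      (pvIsImport line)
      h2
      (by rw [Nat.add_sub_cancel, hgetD]; simp)
      (by omega)
      (fun _ => ⟨if (pvInserts lines).contains (i : Int) then acc ++ [""] else acc,
        by rw [Nat.add_sub_cancel, hgetD]⟩)
    refine ⟨p, ?_⟩
    rw [hp]
    refine Prod.ext ?_ (Prod.ext ?_ rfl)
    · simp only [List.flatMap_cons]
      by_cases hb : ((i : Int) ∈ pvInserts lines) <;>
        simp [hb, List.append_assoc]
    · simp only [List.countP_cons]
      by_cases hb : ((i : Int) ∈ pvInserts lines)
      · simp [hb]
        omega
      · simp [hb]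

lemma pvCount (lines : List String) :
    ((PySem.List.enumerate lines 0).countP
        (fun il => decide (il.1 ∈ pvInserts lines))) = (pvInserts lines).length := by
  have hmap : ((PySem.List.enumerate lines 0).map (fun x => x.1)).countP
      (fun j => decide (j ∈ pvInserts lines)) =
      (PySem.List.enumerate lines 0).countP (fun il => decide (il.1 ∈ pvInserts lines)) :=
    List.countP_map
  rw [← hmap, PySem.List.map_fst_enumerate]
  have h0 : ¬ ((0 : Int) ∈ pvInserts lines) := by
    intro h
    unfold pvInserts at h
    rw [List.mem_filter] at h
    have := PySem.List.mem_pyRange_one.mp h.1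
    omega
  rcases Nat.eq_zero_or_pos lines.length with hn | hn
  · simp [hn, pvInserts]
  · have hsplit : PySem.List.pyRange 0 (0 + (lines.length : Int)) 1 =
        0 :: PySem.List.pyRange 1 (lines.length : Int) 1 := by
      rw [zero_add, PySem.List.pyRange_one_cons (by exact_mod_cast hn)]
      norm_num
    rw [hsplit, List.countP_cons]
    simp only [h0, decide_false, Bool.false_eq_true, if_false, add_zero]
    rw [List.countP_eq_length_filter]
    have hfc : (PySem.List.pyRange 1 (lines.length : Int) 1).filter
        (fun j => decide (j ∈ pvInserts lines)) =
        (PySem.List.pyRange 1 (lines.length : Int) 1).filter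
        (pvInsertCond lines (lines.map pvIsImport)) := by
      apply List.filter_congr
      intro x hx
      have : x ∈ pvInserts lines ↔ pvInsertCond lines (lines.map pvIsImport) x = true := by
        unfold pvInserts
        rw [List.mem_filter]
        exact ⟨fun h => h.2, fun h => ⟨hx, h⟩⟩
      simp [this]
    rw [hfc]
    rfl

lemma pvFoldB (lines : List String) :
    (PySem.List.enumerate lines 0).foldl
        (fun acc il => (if (pvInserts lines).contains il.1 then acc ++ [""] else acc) ++ [il.2]) [] =
      (PySem.List.enumerate lines 0).flatMap
        (fun il => (if (pvInserts lines).contains il.1 then [""] else []) ++ [il.2]) := by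
  have h : (PySem.List.enumerate lines 0).foldl
      (fun acc il => (if (pvInserts lines).contains il.1 then acc ++ [""] else acc) ++ [il.2]) [] =
      (PySem.List.enumerate lines 0).foldl
      (fun acc il => acc ++ ((if (pvInserts lines).contains il.1 then [""] else []) ++ [il.2])) [] := by
    congr 1
    funext acc il
    split <;> simp
  rw [h, PySem.List.foldl_append_eq_flatMap]
  simp

-- ===== VERDICT (by name: the statement is the Claim_ definition above) =====
theorem fix_import_spacing_spec : Claim_equal_fix_import_spacing := by
  intro content _
  unfold Spec_fix_import_spacing fix_import_spacing fix_import_spacing_alt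
  dsimp only
  set lines := (PySem.Str.split? content "\n").getD [] with hl
  obtain ⟨p, hp⟩ := pvLoopA lines lines 0 [] 0 false (by simp) (by simp) (fun _ => rfl)
    (fun h => absurd h (by omega))
  rw [show ((0:Nat):Int) = 0 from rfl] at hp
  rw [hp]
  rw [show List.filter (pvInsertCond lines (List.map pvIsImport lines))
        (PySem.List.pyRange 1 (lines.length : Int) 1) = pvInserts lines from rfl]
  rw [pvFoldB lines]
  simp [pvCount lines]
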